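-- pv_equiv track=rewrite | github.com/clannorg/CLANNAI | video-editor/detection/manual_enhance.py | create_manual_enhance_chunks
-- ===== SOURCE A (Python) =====
-- def create_manual_enhance_chunks(manual_enhance):
--     """
--     Splits the `manual_enhance` list into chunks where consecutive frame indices are grouped together.
--     A new chunk starts when the gap between two indices exceeds 1.
--
--     Parameters:
--         manual_enhance (list): A list of frame indices that need to be manually enhanced.
--
--     Returns:
--         list: A list of lists (chunks), where each sublist contains consecutive frame indices.
--     """
--     if not manual_enhance:
--         return []
--
--     chunks = []
--     current_chunk = [manual_enhance[0]]
--
--     for i in range(1, len(manual_enhance)):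
--         # Check if the current frame index is consecutive to the previous one
--         if manual_enhance[i] - manual_enhance[i - 1] == 1:
--             current_chunk.append(manual_enhance[i])
--         else:
--             chunks.append(current_chunk)
--             current_chunk = [manual_enhance[i]]
--
--     # Append the final chunk
--     chunks.append(current_chunk)
--
--     return chunks
-- ===== SOURCE B (Python) =====
-- def create_manual_enhance_chunks(manual_enhance):
--     if not manual_enhance:
--         return []
--     n = len(manual_enhance)
--     splits = [i for i in range(1, n) if manual_enhance[i] - manual_enhance[i - 1] != 1]
--     bounds = [0] + splits + [n]
--     return [manual_enhance[a:b] for a, b in zip(bounds, bounds[1:])]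
-- ===== Notes on version B (the rewrite author's own statement) =====
-- stated objective: alternative
-- what changed: Replaces A's single accumulator loop (growing a current chunk and flushing it on gaps) by a two-pass boundary decomposition: first collect all split indices i with a[i]-a[i-1] != 1, then slice the list between consecutive boundaries [0]+splits+[n].
import Mathlib
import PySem

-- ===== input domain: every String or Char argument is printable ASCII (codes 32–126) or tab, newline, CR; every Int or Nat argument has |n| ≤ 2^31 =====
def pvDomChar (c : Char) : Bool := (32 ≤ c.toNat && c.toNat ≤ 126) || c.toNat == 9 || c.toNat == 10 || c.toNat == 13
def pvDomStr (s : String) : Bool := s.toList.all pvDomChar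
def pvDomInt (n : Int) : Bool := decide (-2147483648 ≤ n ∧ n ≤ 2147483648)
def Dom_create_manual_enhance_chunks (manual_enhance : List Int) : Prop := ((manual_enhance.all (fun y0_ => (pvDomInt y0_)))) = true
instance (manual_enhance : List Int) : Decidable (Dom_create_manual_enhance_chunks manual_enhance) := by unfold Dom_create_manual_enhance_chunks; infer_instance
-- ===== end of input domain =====

-- B replaces A's single accumulator loop by a boundary pass (collect split indices, then slice
-- between consecutive boundaries); objective: alternative decomposition, same cost.

-- ===== PORT A =====
def create_manual_enhance_chunks (manual_enhance : List Int) : List (List Int) :=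
  if manual_enhance = [] then []
  else
    let s := (PySem.List.pyRange 1 (manual_enhance.length : Int) 1).foldl
      (fun (st : List (List Int) × List Int) i =>
        if PySem.List.pyGetD manual_enhance i 0 - PySem.List.pyGetD manual_enhance (i - 1) 0 = 1
        then (st.1, st.2 ++ [PySem.List.pyGetD manual_enhance i 0])
        else (st.1 ++ [st.2], [PySem.List.pyGetD manual_enhance i 0]))
      ([], [PySem.List.pyGetD manual_enhance 0 0])
    s.1 ++ [s.2]

-- ===== PORT B =====
def create_manual_enhance_chunks_alt (manual_enhance : List Int) : List (List Int) :=
  if manual_enhance = [] then []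
  else
    let n : Int := manual_enhance.length
    let splits := (PySem.List.pyRange 1 n 1).filter
      (fun i => PySem.List.pyGetD manual_enhance i 0 - PySem.List.pyGetD manual_enhance (i - 1) 0 != 1)
    let bounds : List Int := 0 :: (splits ++ [n])
    (bounds.zip bounds.tail).map (fun p => PySem.List.slice manual_enhance (some p.1) (some p.2))

-- ===== PRECONDITION & SPEC =====
def Spec_create_manual_enhance_chunks (manual_enhance : List Int) (out : List (List Int)) : Prop := out = create_manual_enhance_chunks_alt manual_enhance
instance (manual_enhance : List Int) (out : List (List Int)) : Decidable (Spec_create_manual_enhance_chunks manual_enhance out) := by unfold Spec_create_manual_enhance_chunks; infer_instance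

-- ===== CLAIM (what is proved, stated in full; the proofs are below) =====
def Claim_equal_create_manual_enhance_chunks : Prop := ∀ (manual_enhance : List Int), Dom_create_manual_enhance_chunks manual_enhance → Spec_create_manual_enhance_chunks manual_enhance (create_manual_enhance_chunks manual_enhance)

-- ===== LEMMAS AND PROOFS =====

-- A's loop step
def pvStep (m : List Int) (st : List (List Int) × List Int) (i : Int) : List (List Int) × List Int :=
  if PySem.List.pyGetD m i 0 - PySem.List.pyGetD m (i - 1) 0 = 1
  then (st.1, st.2 ++ [PySem.List.pyGetD m i 0])
  else (st.1 ++ [st.2], [PySem.List.pyGetD m i 0])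

-- B's split indices among 1..k-1
def pvSplits (m : List Int) (k : Int) : List Int :=
  (PySem.List.pyRange 1 k 1).filter
    (fun i => PySem.List.pyGetD m i 0 - PySem.List.pyGetD m (i - 1) 0 != 1)

-- last element of a :: s (the last boundary opened so far)
def pvLastB (a : Int) : List Int → Int
  | [] => a
  | x :: t => pvLastB x t

-- the chunks named by consecutive boundary pairs of 0 :: s
def pvPairs (m : List Int) (s : List Int) : List (List Int) :=
  ((0 :: s).zip s).map (fun p => PySem.List.slice m (some p.1) (some p.2))

theorem pvLastB_concat (a x : Int) (s : List Int) : pvLastB a (s ++ [x]) = x := by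
  induction s generalizing a with
  | nil => rfl
  | cons b t ih => exact ih b

theorem pvLastB_mem (a : Int) (s : List Int) : pvLastB a s = a ∨ pvLastB a s ∈ s := by
  induction s generalizing a with
  | nil => exact Or.inl rfl
  | cons b t ih =>
    rcases ih b with h | h
    · exact Or.inr (by simp [pvLastB, h])
    · exact Or.inr (List.mem_cons_of_mem _ h)

theorem pvZipAppend (a x : Int) (s : List Int) :
    ((a :: (s ++ [x])).zip (s ++ [x])) = ((a :: s).zip s) ++ [(pvLastB a s, x)] := by
  induction s generalizing a with
  | nil => rfl
  | cons b t ih => simp [pvLastB, ih b]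

theorem pvSliceExt (m : List Int) (b : Int) (k : Nat) (hb0 : 0 ≤ b) (hbk : b ≤ (k : Int))
    (hk : k < m.length) :
    PySem.List.slice m (some b) (some (k : Int)) ++ [PySem.List.pyGetD m (k : Int) 0] =
      PySem.List.slice m (some b) (some ((k : Int) + 1)) := by
  obtain ⟨bn, rfl⟩ : ∃ bn : Nat, b = (bn : Int) := ⟨b.toNat, (Int.toNat_of_nonneg hb0).symm⟩
  have hbn : bn ≤ k := by exact_mod_cast hbk
  have h1 : ((k : Int) + 1) = ((k + 1 : Nat) : Int) := by push_cast; ring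
  rw [h1, PySem.List.slice_natCast, PySem.List.slice_natCast, PySem.List.pyGetD_natCast]
  have h2 : k + 1 - bn = (k - bn) + 1 := by omega
  rw [h2, List.take_add_one]
  have h3 : (m.drop bn)[k - bn]? = m[k]? := by
    rw [List.getElem?_drop]; congr 1; omega
  simp [h3, List.getElem?_eq_getElem hk, List.getD_eq_getElem?_getD]

theorem pvSplitsMem (m : List Int) (k : Int) (x : Int) (hx : x ∈ pvSplits m k) :
    1 ≤ x ∧ x < k := by
  have := List.mem_filter.mp hx
  exact (PySem.List.mem_pyRange_one).mp this.1

theorem pvLastB_splits_bounds (m : List Int) (k : Int) (hk : 0 ≤ k) :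
    0 ≤ pvLastB 0 (pvSplits m k) ∧ pvLastB 0 (pvSplits m k) ≤ k := by
  rcases pvLastB_mem 0 (pvSplits m k) with h | h
  · rw [h]; exact ⟨le_rfl, hk⟩
  · have := pvSplitsMem m k _ h
    omega

-- the loop invariant: after processing indices 1..k-1 (k ≥ 1), the accumulated chunks are the
-- boundary-pair slices of the splits so far and the current chunk is the slice from the last split
theorem pvInvariant (m : List Int) (hm : m ≠ []) (k : Nat) (h1 : 1 ≤ k) (hk : k ≤ m.length) :
    (PySem.List.pyRange 1 (k : Int) 1).foldl (pvStep m) ([], [PySem.List.pyGetD m 0 0]) =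
      (pvPairs m (pvSplits m (k : Int)),
        PySem.List.slice m (some (pvLastB 0 (pvSplits m (k : Int)))) (some (k : Int))) := by
  induction k with
  | zero => omega
  | succ k ih =>
    by_cases hk1 : k = 0
    · subst hk1
      have hc : (((0 : Nat) + 1 : Nat) : Int) = 1 := by norm_num
      have hr : PySem.List.pyRange 1 (1 : Int) 1 = [] := PySem.List.pyRange_one_eq_nil le_rfl
      obtain ⟨h, t, rfl⟩ : ∃ h t, m = h :: t :=
        ⟨m.headI, m.tail, (List.cons_head!_tail (by simpa using hm)).symm⟩
      rw [hc, hr]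
      simp only [List.foldl_nil, pvSplits, hr, List.filter_nil, pvPairs, List.zip_nil_right,
        List.map_nil, pvLastB]
      congr 1
      rw [show (0 : Int) = ((0 : Nat) : Int) from rfl, show (1 : Int) = ((1 : Nat) : Int) from rfl,
        PySem.List.slice_natCast]
      simp [PySem.List.pyGetD, PySem.List.pyIdx?, PySem.List.pyGet?]
    · have hk' : 1 ≤ k := by omega
      have hkm : k < m.length := by omega
      have hrange : PySem.List.pyRange 1 ((k + 1 : Nat) : Int) 1 =
          PySem.List.pyRange 1 (k : Int) 1 ++ [(k : Int)] := by
        rw [show (((k : Nat) + 1 : Nat) : Int) = (k : Int) + 1 by push_cast; ring]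
        exact PySem.List.pyRange_one_succ_right (by exact_mod_cast hk')
      rw [hrange, List.foldl_append, ih hk' (by omega), List.foldl_cons, List.foldl_nil]
      by_cases h : PySem.List.pyGetD m (k : Int) 0 - PySem.List.pyGetD m ((k : Int) - 1) 0 = 1
      · -- consecutive: the current chunk extends by one element
        have hsplits : pvSplits m ((k + 1 : Nat) : Int) = pvSplits m (k : Int) := by
          unfold pvSplits
          rw [hrange, List.filter_append]
          have : List.filter
              (fun i => PySem.List.pyGetD m i 0 - PySem.List.pyGetD m (i - 1) 0 != 1) [(k : Int)] = [] := by
            simp only [List.filter_cons, List.filter_nil, h]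
            norm_num
          rw [this, List.append_nil]
        have hb := pvLastB_splits_bounds m (k : Int) (by positivity)
        rw [hsplits]
        rw [show (((k : Nat) + 1 : Nat) : Int) = (k : Int) + 1 by push_cast; ring]
        rw [← pvSliceExt m _ k hb.1 hb.2 hkm]
        simp only [pvStep, h, if_true]
      · -- gap: close the chunk and open a new one at index k
        have hsplits : pvSplits m ((k + 1 : Nat) : Int) = pvSplits m (k : Int) ++ [(k : Int)] := by
          unfold pvSplits
          rw [hrange, List.filter_append]
          have : List.filter
              (fun i => PySem.List.pyGetD m i 0 - PySem.List.pyGetD m (i - 1) 0 != 1) [(k : Int)] = [(k : Int)] := by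
            simp only [List.filter_cons, List.filter_nil, bne_iff_ne, ne_eq, h,
              not_false_eq_true, if_pos]
          rw [this]
        rw [hsplits]
        simp only [pvStep, h, if_false]
        congr 1
        · unfold pvPairs
          rw [pvZipAppend, List.map_append]
          rfl
        · rw [pvLastB_concat]
          rw [show (((k : Nat) + 1 : Nat) : Int) = ((k + 1 : Nat) : Int) from rfl,
            show ((k : Nat) : Int) = (((k : Nat) : Nat) : Int) from rfl,
            PySem.List.slice_natCast, PySem.List.pyGetD_natCast]
          have : k + 1 - k = 1 := by omega
          rw [this, List.take_one_drop_eq_of_lt_length hkm]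
          simp [List.getD_eq_getElem?_getD, List.getElem?_eq_getElem hkm]

-- ===== VERDICT (by name: the statement is the Claim_ definition above) =====
theorem create_manual_enhance_chunks_spec : Claim_equal_create_manual_enhance_chunks := by
  intro m _
  unfold Spec_create_manual_enhance_chunks create_manual_enhance_chunks create_manual_enhance_chunks_alt
  by_cases hm : m = []
  · simp [hm]
  · simp only [hm, if_false]
    have hlen : 1 ≤ m.length := by
      cases m with | nil => exact absurd rfl hm | cons a t => simp
    have hinv := pvInvariant m hm m.length hlen le_rfl
    rw [show (fun (st : List (List Int) × List Int) (i : Int) =>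
        if PySem.List.pyGetD m i 0 - PySem.List.pyGetD m (i - 1) 0 = 1
        then (st.1, st.2 ++ [PySem.List.pyGetD m i 0])
        else (st.1 ++ [st.2], [PySem.List.pyGetD m i 0])) = pvStep m from rfl]
    rw [hinv]
    have hzip := pvZipAppend 0 ((m.length : Nat) : Int) (pvSplits m ((m.length : Nat) : Int))
    show pvPairs m (pvSplits m ((m.length : Nat) : Int)) ++
        [PySem.List.slice m (some (pvLastB 0 (pvSplits m ((m.length : Nat) : Int))))
          (some ((m.length : Nat) : Int))] = _
    rw [show ((PySem.List.pyRange 1 ((m.length : Nat) : Int) 1).filter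
        (fun i => PySem.List.pyGetD m i 0 - PySem.List.pyGetD m (i - 1) 0 != 1)) =
        pvSplits m ((m.length : Nat) : Int) from rfl]
    rw [List.tail_cons, hzip, List.map_append]
    rfl
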